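-- pv_equiv track=rewrite | github.com/StpME/VCThemeGUI | src/dscplus.py | get_backdrop_section
-- ===== SOURCE A (Python) =====
-- def get_backdrop_section(css_content):
--     dark_backdrops = list()
--     current_section = None
--     for line in css_content.split("\n"):
--         if ".theme-dark" in line:
--             current_section = "dark"
--         elif "--dplus-backdrop" in line:
--             if current_section == "dark" and line not in dark_backdrops:
--                 dark_backdrops.append(line)
--     return "Backdrop list:\n" + "\n".join(dark_backdrops)
-- ===== SOURCE B (Python) =====
-- def get_backdrop_section(css_content):
--     _, sep, tail = css_content.partition(".theme-dark")
--     if not sep: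
--         return "Backdrop list:\n"
--     _, _, rest = tail.partition("\n")
--     picked = dict.fromkeys(
--         line for line in rest.split("\n")
--         if "--dplus-backdrop" in line and ".theme-dark" not in line
--     )
--     return "Backdrop list:\n" + "\n".join(picked)
-- ===== Notes on version B (the rewrite author's own statement) =====
-- stated objective: alternative
-- what changed: B never scans the line list for the boundary: it partitions the raw string at the first occurrence of the dark-theme marker and again at the next newline, then dedups the filtered suffix lines via dict.fromkeys, replacing A's single stateful flag-loop with list-membership dedup.
import Mathlib
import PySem

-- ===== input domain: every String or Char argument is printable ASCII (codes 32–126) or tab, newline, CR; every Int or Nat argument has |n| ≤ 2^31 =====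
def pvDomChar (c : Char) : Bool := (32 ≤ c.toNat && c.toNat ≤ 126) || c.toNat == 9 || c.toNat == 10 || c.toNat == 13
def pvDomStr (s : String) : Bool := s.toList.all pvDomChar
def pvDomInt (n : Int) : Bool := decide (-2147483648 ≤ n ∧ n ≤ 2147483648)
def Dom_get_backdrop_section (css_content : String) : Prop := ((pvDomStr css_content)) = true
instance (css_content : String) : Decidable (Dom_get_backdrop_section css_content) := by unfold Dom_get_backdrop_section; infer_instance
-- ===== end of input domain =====

-- B finds the section boundary by partitioning the raw string at the first dark-theme marker
-- occurrence and the following newline (no scan over the line list), then dedups the filtered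
-- suffix lines via dict.fromkeys (objective: alternative algorithm; no speed claim).

-- ===== PORT A =====
-- A's loop state: (dark_backdrops, current_section)
def pvStepA (s : List String × Option String) (line : String) : List String × Option String :=
  if PySem.Str.isIn ".theme-dark" line then (s.1, some "dark")
  else if PySem.Str.isIn "--dplus-backdrop" line then
    (if s.2 = some "dark" ∧ line ∉ s.1 then (s.1 ++ [line], s.2) else (s.1, s.2))
  else s

def get_backdrop_section (css_content : String) : String :=
  let lines := (PySem.Str.split? css_content "\n").getD []
  let fin := lines.foldl pvStepA ([], none)
  "Backdrop list:\n" ++ PySem.Str.join "\n" fin.1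

-- ===== PORT B =====
-- hand port of Python's str.partition(sub): (head, sub, tail) at the first occurrence,
-- (s, "", "") when absent; exact via PySem.Str.find and PySem.Str.slice
def pvPartition (s sub : String) : String × String × String :=
  let i := PySem.Str.find s sub
  if i = -1 then (s, "", "")
  else (PySem.Str.slice s none (some i), sub,
        PySem.Str.slice s (some (i + PySem.Str.len sub)) none)

def pvGood (line : String) : Bool :=
  PySem.Str.isIn "--dplus-backdrop" line && !(PySem.Str.isIn ".theme-dark" line)

def get_backdrop_section_alt (css_content : String) : String :=
  let p1 := pvPartition css_content ".theme-dark"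
  if p1.2.1 = "" then "Backdrop list:\n"
  else
    let p2 := pvPartition p1.2.2 "\n"
    let picked := PySem.List.dedup (((PySem.Str.split? p2.2.2 "\n").getD []).filter pvGood)
    "Backdrop list:\n" ++ PySem.Str.join "\n" picked

-- ===== PRECONDITION & SPEC =====
def Spec_get_backdrop_section (css_content : String) (out : String) : Prop := out = get_backdrop_section_alt css_content
instance (css_content : String) (out : String) : Decidable (Spec_get_backdrop_section css_content out) := by unfold Spec_get_backdrop_section; infer_instance

-- ===== CLAIM (what is proved, stated in full; the proofs are below) =====
def Claim_equal_get_backdrop_section : Prop := ∀ (css_content : String), Dom_get_backdrop_section css_content → Spec_get_backdrop_section css_content (get_backdrop_section css_content)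

-- ===== LEMMAS AND PROOFS =====

-- ---- A-side loop characterisation (flag off until a marker line; append-if-new after) ----

theorem pvFoldA_pre (lines : List String) (acc : List String)
    (h : ∀ l ∈ lines, PySem.Str.isIn ".theme-dark" l = false) :
    lines.foldl pvStepA (acc, none) = (acc, none) := by
  induction lines with
  | nil => rfl
  | cons x xs ih =>
    have hx := h x (by simp)
    simp only [List.foldl_cons, pvStepA, hx]
    by_cases hb : PySem.Str.isIn "--dplus-backdrop" x = true <;>
      simp [ih (fun l hl => h l (by simp [hl]))]

theorem pvFoldA_dark (lines : List String) (acc : List String) :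
    lines.foldl pvStepA (acc, some "dark") =
      (lines.foldl (fun a l => if pvGood l then PySem.Set.add a l else a) acc, some "dark") := by
  induction lines generalizing acc with
  | nil => rfl
  | cons x xs ih =>
    by_cases hm : PySem.Str.isIn ".theme-dark" x = true
    · have hg : pvGood x = false := by
        simp only [pvGood, hm, Bool.not_true, Bool.and_false]
      simp only [List.foldl_cons, pvStepA, hm, hg]
      simp [ih]
    · rw [Bool.not_eq_true] at hm
      by_cases hb : PySem.Str.isIn "--dplus-backdrop" x = true
      · have hg : pvGood x = true := by
          simp only [pvGood, hm, hb, Bool.not_false, Bool.and_self]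
        simp only [List.foldl_cons, pvStepA, hm, hb, hg]
        by_cases hmem : x ∈ acc <;> simp [hmem, ih, PySem.Set.add_eq_ite]
      · rw [Bool.not_eq_true] at hb
        have hg : pvGood x = false := by simp only [pvGood, hb, Bool.false_and]
        simp only [List.foldl_cons, pvStepA, hm, hb, hg]
        simp [ih]

theorem pvFoldGood (lines : List String) :
    lines.foldl (fun a l => if pvGood l then PySem.Set.add a l else a) [] =
      PySem.List.dedup (lines.filter pvGood) := by
  rw [PySem.List.foldl_if_eq_foldl_filter]
  simp [PySem.List.dedup_eq_ofList, PySem.Set.ofList_eq_foldl]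

-- A's whole result, by the position of the first marker line
theorem pvMainA_none (lines : List String)
    (h : lines.findIdx? (fun l => PySem.Str.isIn ".theme-dark" l) = none) :
    "Backdrop list:\n" ++ PySem.Str.join "\n" (lines.foldl pvStepA ([], none)).1
      = "Backdrop list:\n" := by
  have hall : ∀ l ∈ lines, PySem.Str.isIn ".theme-dark" l = false := by
    intro l hl
    have := List.findIdx?_eq_none_iff.mp h
    simpa using this l hl
  rw [pvFoldA_pre lines [] hall]
  show "Backdrop list:\n" ++ PySem.Str.join "\n" ([] : List String) = "Backdrop list:\n"
  decide

theorem pvMainA_some (lines : List String) (i : Nat)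
    (h : lines.findIdx? (fun l => PySem.Str.isIn ".theme-dark" l) = some i) :
    "Backdrop list:\n" ++ PySem.Str.join "\n" (lines.foldl pvStepA ([], none)).1
      = "Backdrop list:\n" ++
          PySem.Str.join "\n" (PySem.List.dedup ((lines.drop (i + 1)).filter pvGood)) := by
  obtain ⟨hi, hpi, hprev⟩ := List.findIdx?_eq_some_iff_getElem.mp h
  have hsplit : lines = lines.take i ++ lines[i] :: lines.drop (i + 1) := by
    conv_lhs => rw [← List.take_append_drop i lines, List.drop_eq_getElem_cons hi]
  have h1 : lines.foldl pvStepA ([], none) =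
      (lines.drop (i + 1)).foldl pvStepA ([], some "dark") := by
    conv_lhs => rw [hsplit]
    rw [List.foldl_append,
      pvFoldA_pre _ _ (by
        intro l hl
        obtain ⟨j, hj, hjl⟩ := List.mem_take_iff_getElem.mp hl
        have := hprev j (by omega)
        simpa [hjl] using this)]
    simp only [List.foldl_cons, pvStepA, hpi]
    simp
  rw [h1, pvFoldA_dark, pvFoldGood]

-- ---- char-level model of s.split("\n") ----

def pvSplit : List Char → List (List Char)
  | [] => [[]]
  | c :: rest => if c = '\n' then [] :: pvSplit rest else (pvSplit rest).modifyHead (c :: ·)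

theorem pvSplit_ne_nil (s : List Char) : pvSplit s ≠ [] := by
  induction s with
  | nil => simp [pvSplit]
  | cons c rest ih =>
    by_cases hc : c = '\n' <;> simp [pvSplit, hc]
    cases h : pvSplit rest with
    | nil => exact absurd h ih
    | cons a l => simp

theorem pvGo_spec (fuel : Nat) (l cur : List Char) (acc : List (List Char)) (h : l.length < fuel) :
    PySem.Chars.splitOn.go ['\n'] fuel l cur acc
      = acc.reverse ++ (pvSplit l).modifyHead (cur.reverse ++ ·) := by
  induction fuel generalizing l cur acc with
  | zero => omega
  | succ f ih =>
    cases l with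
    | nil => simp [PySem.Chars.splitOn.go, pvSplit, List.modifyHead]
    | cons c rest =>
      by_cases hc : c = '\n'
      · subst hc
        simp only [PySem.Chars.splitOn.go]
        rw [if_pos (by simp [List.isPrefixOf])]
        rw [show List.drop ['\n'].length ('\n' :: rest) = rest from by simp]
        rw [ih rest [] (cur.reverse :: acc) (by simp at h ⊢; omega)]
        simp [pvSplit, List.modifyHead]
        cases pvSplit rest <;> rfl
      · simp only [PySem.Chars.splitOn.go]
        rw [if_neg (by simp [List.isPrefixOf]; exact fun e => hc e.symm)]
        rw [ih rest (c :: cur) acc (by simp at h ⊢; omega)]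
        simp only [pvSplit, if_neg hc]
        cases hr : pvSplit rest with
        | nil => exact absurd hr (pvSplit_ne_nil rest)
        | cons x t => simp [List.modifyHead]

theorem pvSplitOn_eq (s : List Char) : PySem.Chars.splitOn s ['\n'] = pvSplit s := by
  have h := pvGo_spec (s.length + 1) s [] [] (by omega)
  simp only [PySem.Chars.splitOn]
  rw [h]
  cases hr : pvSplit s with
  | nil => exact absurd hr (pvSplit_ne_nil s)
  | cons a t => simp [List.modifyHead]

theorem pvSplitStr (t : String) :
    (PySem.Str.split? t "\n").getD [] = (pvSplit t.toList).map String.ofList := by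
  have h1 := PySem.Str.split?_map t "\n"
  have hnl : ("\n" : String).toList = ['\n'] := by decide
  cases h : PySem.Str.split? t "\n" with
  | none => rw [h] at h1; simp [PySem.Chars.split?, hnl] at h1
  | some L =>
    rw [h] at h1
    simp only [PySem.Chars.split?, hnl, Option.map_some] at h1
    rw [if_neg (by decide)] at h1
    have h2 : L.map String.toList = pvSplit t.toList := by
      rw [← pvSplitOn_eq]; exact Option.some.inj h1
    simp only [Option.getD_some]
    rw [← h2, List.map_map]
    simp [Function.comp_def, String.ofList_toList]

theorem pvSplit_append_cons (a b : List Char) :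
    pvSplit (a ++ '\n' :: b) = pvSplit a ++ pvSplit b := by
  induction a with
  | nil => simp [pvSplit]
  | cons c a' ih =>
    by_cases hc : c = '\n'
    · simp [pvSplit, hc, ih]
    · simp only [List.cons_append, pvSplit, if_neg hc, ih]
      cases h : pvSplit a' with
      | nil => exact absurd h (pvSplit_ne_nil a')
      | cons x l => simp [List.modifyHead]

theorem pvSplit_no_nl (y : List Char) (h : '\n' ∉ y) : pvSplit y = [y] := by
  induction y with
  | nil => rfl
  | cons c rest ih =>
    have hc : c ≠ '\n' := by intro e; exact h (by simp [e])
    simp [pvSplit, hc, ih (by intro e; exact h (by simp [e])), List.modifyHead]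

theorem pvSplit_append_no_nl (x y : List Char) (h : '\n' ∉ y) :
    ∃ L z, pvSplit x = L ++ [z] ∧ pvSplit (x ++ y) = L ++ [z ++ y] := by
  induction x with
  | nil => exact ⟨[], [], by simp [pvSplit], by simp [pvSplit_no_nl y h]⟩
  | cons c x' ih =>
    obtain ⟨L, z, h1, h2⟩ := ih
    by_cases hc : c = '\n'
    · exact ⟨[] :: L, z, by simp [pvSplit, hc, h1], by simp [pvSplit, hc, h2]⟩
    · cases L with
      | nil =>
        refine ⟨[], c :: z, ?_, ?_⟩
        · simp [pvSplit, hc, h1, List.modifyHead]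
        · simp [pvSplit, hc, h2, List.modifyHead]
      | cons hd tl =>
        refine ⟨(c :: hd) :: tl, z, ?_, ?_⟩
        · simp [pvSplit, hc, h1, List.modifyHead]
        · simp [pvSplit, hc, h2, List.modifyHead]

theorem pvSplit_head_prefix (s : List Char) : ∀ x t, pvSplit s = x :: t → x <+: s := by
  induction s with
  | nil => intro x t hx; simp [pvSplit] at hx; simp [hx.1]
  | cons c rest ih =>
    intro x t hx
    by_cases hc : c = '\n'
    · simp [pvSplit, hc] at hx
      simp [hx.1]
    · cases hr : pvSplit rest with
      | nil => exact absurd hr (pvSplit_ne_nil rest)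
      | cons y t' =>
        simp [pvSplit, hc, hr, List.modifyHead] at hx
        obtain ⟨u, hu⟩ := ih y t' hr
        refine ⟨u, ?_⟩
        rw [← hx.1]
        simp [hu]

theorem pvSplit_parts (s : List Char) : ∀ l ∈ pvSplit s, l <:+: s := by
  induction s with
  | nil => intro l hl; simp [pvSplit] at hl; simp [hl]
  | cons c rest ih =>
    intro l hl
    by_cases hc : c = '\n'
    · subst hc
      simp [pvSplit] at hl
      rcases hl with h | hl
      · subst h; exact ⟨[], '\n' :: rest, by simp⟩
      · obtain ⟨a, b, hab⟩ := ih l hl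
        exact ⟨'\n' :: a, b, by simp [hab]⟩
    · cases hr : pvSplit rest with
      | nil => exact absurd hr (pvSplit_ne_nil rest)
      | cons y t' =>
        simp [pvSplit, hc, hr, List.modifyHead] at hl
        rcases hl with h | hl
        · obtain ⟨u, hu⟩ := pvSplit_head_prefix rest y t' hr
          subst h
          exact ⟨[], u, by simp [hu]⟩
        · obtain ⟨a, b, hab⟩ := ih l (by rw [hr]; exact List.mem_cons_of_mem _ hl)
          exact ⟨c :: a, b, by simp [hab]⟩

-- ---- findIdx? helpers ----

theorem pvFindIdx?_map {α β : Type} (f : α → β) (p : β → Bool) (l : List α) :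
    (l.map f).findIdx? p = l.findIdx? (fun a => p (f a)) := by
  induction l with
  | nil => rfl
  | cons x xs ih => simp [List.findIdx?_cons, ih]

theorem pvFindIdx?_last {α : Type} (p : α → Bool) (L R : List α) (e : α)
    (hL : ∀ l ∈ L, p l = false) (he : p e = true) :
    (L ++ e :: R).findIdx? p = some L.length := by
  induction L with
  | nil => simp [List.findIdx?_cons, he]
  | cons x xs ih =>
    have hx := hL x (by simp)
    simp only [List.cons_append, List.findIdx?_cons, hx]
    simp [ih (fun l hl => hL l (by simp [hl]))]

-- ---- first-occurrence consequences of find ----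

theorem pvSingleton_infix (c : Char) (l : List Char) : [c] <:+: l ↔ c ∈ l := by
  constructor
  · intro h; exact h.mem (by simp)
  · intro h
    obtain ⟨a, b, rfl⟩ := List.append_of_mem h
    exact ⟨a, b, by simp⟩

-- nothing inside s.take (find s t) contains t
theorem pvFind_take (v t : List Char) (ht : t ≠ []) (Q : Nat)
    (h : PySem.Chars.find v t = (Q : Int)) (l : List Char) (hl : l <:+: v.take Q) :
    PySem.Chars.isIn t l = false := by
  by_contra hmem
  rw [Bool.not_eq_false] at hmem
  obtain ⟨j, hj⟩ := (PySem.Chars.exists_prefix_drop_iff_isIn t l).mpr hmem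
  have hjl : j < l.length := by
    by_contra hge
    rw [List.drop_eq_nil_of_le (by omega)] at hj
    exact ht (List.prefix_nil.mp hj)
  obtain ⟨a, b, hab⟩ := hl
  have h0 : (0:Int) ≤ PySem.Chars.find v t := by rw [h]; exact Int.natCast_nonneg Q
  obtain ⟨_, hmin⟩ := PySem.Chars.find_spec h0
  have hQ : (PySem.Chars.find v t).toNat = Q := by rw [h]; simp
  rw [hQ] at hmin
  have hlen := congrArg List.length hab
  rw [List.length_append, List.length_append] at hlen
  have hle := List.length_take_le Q v
  apply hmin (a.length + j) (by omega)
  have hdv : v.drop (a.length + j) = (v.take Q).drop (a.length + j) ++ v.drop Q := by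
    conv_lhs => rw [← List.take_append_drop Q v]
    rw [List.drop_append_of_le_length (by omega)]
  have hdt : (v.take Q).drop (a.length + j) = l.drop j ++ b := by
    rw [← hab, List.append_assoc, List.drop_length_add_append,
      List.drop_append_of_le_length (by omega)]
  rw [hdv, hdt, List.append_assoc]
  exact hj.trans (List.prefix_append _ _)

-- the two structural decompositions of the line list when the marker is found
theorem pvFound_noNl (s : List Char) (P : Nat) (v : List Char)
    (hfind : PySem.Chars.find s ".theme-dark".toList = (P : Int))
    (hv : ".theme-dark".toList ++ v = s.drop P)
    (hq : PySem.Chars.find v ['\n'] = -1) :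
    ∃ L z, pvSplit s = L ++ [z] ∧
      (pvSplit s).findIdx? (fun l => PySem.Chars.isIn ".theme-dark".toList l) = some L.length := by
  have hvnl : '\n' ∉ v := by
    intro hmem
    rw [PySem.Chars.find_eq_neg_one_iff] at hq
    exact hq ((pvSingleton_infix _ _).mpr hmem)
  have hy : '\n' ∉ (".theme-dark".toList ++ v) := by
    intro hmem
    rcases List.mem_append.mp hmem with hmem | hmem
    · revert hmem; decide
    · exact hvnl hmem
  obtain ⟨L, z, h1, h2⟩ := pvSplit_append_no_nl (s.take P) _ hy
  have hsu : s = s.take P ++ (".theme-dark".toList ++ v) := by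
    rw [hv]; exact (List.take_append_drop P s).symm
  have hps : pvSplit s = L ++ [z ++ (".theme-dark".toList ++ v)] := by
    conv_lhs => rw [hsu]
    exact h2
  refine ⟨L, _, hps, ?_⟩
  rw [hps]
  apply pvFindIdx?_last
  · intro l hlmem
    apply pvFind_take s ".theme-dark".toList (by decide) P hfind
    have : l ∈ pvSplit (s.take P) := by rw [h1]; exact List.mem_append_left _ hlmem
    exact pvSplit_parts _ l this
  · apply (PySem.Chars.exists_prefix_drop_iff_isIn _ _).mp
    exact ⟨z.length, by rw [List.drop_left]; exact List.prefix_append _ _⟩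

theorem pvFound_nl (s : List Char) (P Q : Nat) (v : List Char)
    (hfind : PySem.Chars.find s ".theme-dark".toList = (P : Int))
    (hv : ".theme-dark".toList ++ v = s.drop P)
    (hq : PySem.Chars.find v ['\n'] = (Q : Int)) :
    ∃ L z, pvSplit s = (L ++ [z]) ++ pvSplit (v.drop (Q + 1)) ∧
      (pvSplit s).findIdx? (fun l => PySem.Chars.isIn ".theme-dark".toList l) = some L.length := by
  have h0 : (0:Int) ≤ PySem.Chars.find v ['\n'] := by rw [hq]; exact Int.natCast_nonneg Q
  obtain ⟨hpre, _⟩ := PySem.Chars.find_spec h0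
  rw [hq] at hpre
  simp only [Int.toNat_natCast] at hpre
  obtain ⟨r, hr⟩ := hpre
  have hrd : r = v.drop (Q + 1) := by
    have h1 : (v.drop Q).drop 1 = r := by rw [← hr]; simp
    rw [← h1, List.drop_drop, Nat.add_comm]
  have hwnl : '\n' ∉ v.take Q := by
    intro hmem
    have h2 := pvFind_take v ['\n'] (by decide) Q hq (v.take Q) (List.infix_refl _)
    rw [PySem.Chars.isIn_eq_false_iff] at h2
    exact h2 ((pvSingleton_infix _ _).mpr hmem)
  have hy : '\n' ∉ (".theme-dark".toList ++ v.take Q) := by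
    intro hmem
    rcases List.mem_append.mp hmem with hmem | hmem
    · revert hmem; decide
    · exact hwnl hmem
  obtain ⟨L, z, h1, h2⟩ := pvSplit_append_no_nl (s.take P) _ hy
  have hsu : s = (s.take P ++ (".theme-dark".toList ++ v.take Q)) ++ '\n' :: v.drop (Q + 1) := by
    conv_lhs => rw [← List.take_append_drop P s, ← hv]
    rw [← hrd]
    conv_lhs => rw [← List.take_append_drop Q v, ← hr]
    simp
  have hps : pvSplit s = (L ++ [z ++ (".theme-dark".toList ++ v.take Q)]) ++ pvSplit (v.drop (Q + 1)) := by
    conv_lhs => rw [hsu]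
    rw [pvSplit_append_cons, h2]
  refine ⟨L, _, hps, ?_⟩
  rw [hps]
  rw [List.append_assoc, List.singleton_append]
  apply pvFindIdx?_last
  · intro l hlmem
    apply pvFind_take s ".theme-dark".toList (by decide) P hfind
    have h3 : l ∈ pvSplit (s.take P) := by rw [h1]; exact List.mem_append_left _ hlmem
    exact pvSplit_parts _ l h3
  · apply (PySem.Chars.exists_prefix_drop_iff_isIn _ _).mp
    exact ⟨z.length, by rw [List.drop_left]; exact List.prefix_append _ _⟩

-- ===== VERDICT (by name: the statement is the Claim_ definition above) =====
theorem get_backdrop_section_spec : Claim_equal_get_backdrop_section := by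
  intro css _
  show get_backdrop_section css = get_backdrop_section_alt css
  have hnl : ("\n" : String).toList = ['\n'] := by decide
  have hA0 : get_backdrop_section css
      = "Backdrop list:\n" ++ PySem.Str.join "\n"
          ((((pvSplit css.toList).map String.ofList).foldl pvStepA ([], none)).1) := by
    simp only [get_backdrop_section, pvSplitStr css]
  have hpred : (fun (a : List Char) => PySem.Str.isIn ".theme-dark" (String.ofList a))
      = (fun a => PySem.Chars.isIn ".theme-dark".toList a) := by
    funext a; simp [PySem.Str.isIn_eq, String.toList_ofList]
  have hidxmap : ((pvSplit css.toList).map String.ofList).findIdx?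
        (fun l => PySem.Str.isIn ".theme-dark" l)
      = (pvSplit css.toList).findIdx? (fun a => PySem.Chars.isIn ".theme-dark".toList a) := by
    simp only [pvFindIdx?_map]
    rw [hpred]
  by_cases hneg : PySem.Str.find css ".theme-dark" = -1
  · have hnoM : ¬ (".theme-dark".toList <:+: css.toList) := by
      rw [PySem.Str.find_eq] at hneg
      exact (PySem.Chars.find_eq_neg_one_iff _ _).mp hneg
    have hidx : (pvSplit css.toList).findIdx? (fun a => PySem.Chars.isIn ".theme-dark".toList a)
        = none := by
      rw [List.findIdx?_eq_none_iff]
      intro l hl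
      rw [PySem.Chars.isIn_eq_false_iff]
      exact fun hinf => hnoM (hinf.trans (pvSplit_parts _ l hl))
    have hA := pvMainA_none ((pvSplit css.toList).map String.ofList) (by rw [hidxmap, hidx])
    have hB : get_backdrop_section_alt css = "Backdrop list:\n" := by
      simp only [get_backdrop_section_alt, pvPartition]
      rw [if_pos hneg]
      dsimp only
      rw [if_pos rfl]
    rw [hA0, hA, hB]
  · have h0 : (0:Int) ≤ PySem.Chars.find css.toList ".theme-dark".toList := by
      rw [PySem.Str.find_eq] at hneg
      have := PySem.Chars.neg_one_le_find css.toList ".theme-dark".toList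
      omega
    obtain ⟨P, hfindP⟩ : ∃ P : Nat, PySem.Chars.find css.toList ".theme-dark".toList = (P : Int) :=
      ⟨_, (Int.toNat_of_nonneg h0).symm⟩
    obtain ⟨hpre, _⟩ := PySem.Chars.find_spec h0
    rw [hfindP] at hpre
    simp only [Int.toNat_natCast] at hpre
    obtain ⟨v, hv⟩ := hpre
    have hlen11 : PySem.Str.len ".theme-dark" = 11 := by decide
    have hlen1 : PySem.Str.len "\n" = 1 := by decide
    set tStr : String := PySem.Str.slice css
        (some (PySem.Str.find css ".theme-dark" + PySem.Str.len ".theme-dark")) none with htdef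
    have htail : tStr.toList = v := by
      rw [htdef, PySem.Str.toList_slice]
      simp only [PySem.Chars.slice_eq_listSlice]
      rw [PySem.Str.find_eq, hfindP, hlen11]
      rw [PySem.List.slice_from _ (by omega)]
      rw [show ((P:Int) + 11).toNat = P + 11 from by omega]
      rw [show css.toList.drop (P + 11) = (css.toList.drop P).drop 11 from by
        rw [List.drop_drop, Nat.add_comm]]
      rw [← hv]
      exact List.drop_left' (by decide)
    have hfq0 : PySem.Str.find tStr "\n" = PySem.Chars.find v ['\n'] := by
      rw [PySem.Str.find_eq, htail, hnl]
    have hsepne : ¬ ((".theme-dark" : String) = "") := by decide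
    by_cases hq : PySem.Chars.find v ['\n'] = -1
    · obtain ⟨L, z, hps, hidx⟩ := pvFound_noNl css.toList P v hfindP hv hq
      have hA := pvMainA_some ((pvSplit css.toList).map String.ofList) L.length
        (by rw [hidxmap, hidx])
      have hdrop : (((pvSplit css.toList).map String.ofList)).drop (L.length + 1) = [] := by
        apply List.drop_eq_nil_of_le
        simp [hps]
      have hB : get_backdrop_section_alt css = "Backdrop list:\n" := by
        simp only [get_backdrop_section_alt, pvPartition]
        rw [if_neg hneg]
        dsimp only
        rw [← htdef]
        rw [if_neg hsepne]
        rw [if_pos (by rw [hfq0]; exact hq)]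
        dsimp only
        decide
      rw [hA0, hA, hdrop, hB]
      decide
    · obtain ⟨Q, hqQ⟩ : ∃ Q : Nat, PySem.Chars.find v ['\n'] = (Q : Int) := by
        have := PySem.Chars.neg_one_le_find v ['\n']
        exact ⟨_, (Int.toNat_of_nonneg (by omega)).symm⟩
      obtain ⟨L, z, hps, hidx⟩ := pvFound_nl css.toList P Q v hfindP hv hqQ
      have hA := pvMainA_some ((pvSplit css.toList).map String.ofList) L.length
        (by rw [hidxmap, hidx])
      have hdrop : (((pvSplit css.toList).map String.ofList)).drop (L.length + 1)
          = (pvSplit (v.drop (Q + 1))).map String.ofList := by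
        rw [hps, List.map_append]
        have hlen : ((L ++ [z]).map String.ofList).length = L.length + 1 := by simp
        rw [← hlen, List.drop_left]
      have hrestL : (PySem.Str.slice tStr
            (some (PySem.Str.find tStr "\n" + PySem.Str.len "\n")) none).toList
          = v.drop (Q + 1) := by
        rw [PySem.Str.toList_slice]
        simp only [PySem.Chars.slice_eq_listSlice]
        rw [htail, hfq0, hqQ, hlen1]
        rw [PySem.List.slice_from _ (by omega)]
        rw [show ((Q:Int) + 1).toNat = Q + 1 from by omega]
      have hB : get_backdrop_section_alt css
          = "Backdrop list:\n" ++ PySem.Str.join "\n"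
              (PySem.List.dedup
                (((pvSplit (v.drop (Q + 1))).map String.ofList).filter pvGood)) := by
        simp only [get_backdrop_section_alt, pvPartition]
        rw [if_neg hneg]
        dsimp only
        rw [← htdef]
        rw [if_neg hsepne]
        rw [if_neg (by rw [hfq0, hqQ]; omega)]
        dsimp only
        rw [pvSplitStr, hrestL]
      rw [hA0, hA, hdrop, hB]
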